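-- pv_equiv track=rewrite | github.com/usama03111/odoo18-custom-addons | odoo_task_approvals/models/task_request.py | _update_task_state
-- ===== SOURCE A (Python) =====
-- def _update_task_state(statuses, required_approved, minimal_approved):
--     """Helper method to determine task state based on approvals"""
--     if 'cancel' in statuses:
--         return '1_canceled'
--     elif statuses.count('approved') >= minimal_approved and required_approved:
--         return '1_done'
--     elif 'approved' in statuses and any(s in ['pending', 'waiting'] for s in statuses):
--         return '03_approved'
--     elif any(s in ['new', 'pending', 'waiting', 'approved'] for s in statuses):
--         return 'pending'
--     return '01_in_progress'
-- ===== SOURCE B (Python) =====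
-- def _update_task_state(statuses, required_approved, minimal_approved):
--     """Determine task state in a single tallying pass over statuses."""
--     has_cancel = False
--     approved_count = 0
--     has_pending_waiting = False
--     has_any = False
--     for s in statuses:
--         if s == 'cancel':
--             has_cancel = True
--         if s == 'approved':
--             approved_count += 1
--         if s == 'pending' or s == 'waiting':
--             has_pending_waiting = True
--         if s == 'new' or s == 'pending' or s == 'waiting' or s == 'approved':
--             has_any = True
--     if has_cancel:
--         return '1_canceled'
--     if approved_count >= minimal_approved and required_approved:
--         return '1_done'
--     if approved_count > 0 and has_pending_waiting:
--         return '03_approved'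
--     if has_any:
--         return 'pending'
--     return '01_in_progress'
-- ===== Notes on version B (the rewrite author's own statement) =====
-- stated objective: alternative
-- what changed: Replaces A's five separate scans of the list (membership tests, a count, and two any() generators) with one pass accumulating four tallies, then applies the same decision cascade to the tallies.
import Mathlib
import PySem

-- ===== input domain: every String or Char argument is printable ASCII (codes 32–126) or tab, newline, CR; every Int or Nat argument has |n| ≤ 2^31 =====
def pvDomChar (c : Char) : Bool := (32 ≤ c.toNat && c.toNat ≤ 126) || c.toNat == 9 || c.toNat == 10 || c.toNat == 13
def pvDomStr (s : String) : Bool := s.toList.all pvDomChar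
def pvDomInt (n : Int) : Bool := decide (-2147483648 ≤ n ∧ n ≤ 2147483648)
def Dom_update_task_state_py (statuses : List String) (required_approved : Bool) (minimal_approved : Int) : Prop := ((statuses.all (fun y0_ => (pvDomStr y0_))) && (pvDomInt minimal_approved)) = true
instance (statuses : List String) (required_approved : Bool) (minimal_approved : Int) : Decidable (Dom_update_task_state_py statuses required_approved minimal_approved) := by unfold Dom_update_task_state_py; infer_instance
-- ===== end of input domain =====

-- B replaces A's five separate scans with one tallying pass; same decision cascade — alternative, not claimed faster.
-- ===== PORT A =====
-- Literal port of A: membership tests, a count, and two any() scans, in A's branch order.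
def update_task_state_py (statuses : List String) (required_approved : Bool) (minimal_approved : Int) : String :=
  if statuses.contains "cancel" then "1_canceled"
  else if (PySem.List.count statuses "approved" : Int) ≥ minimal_approved ∧ required_approved = true then "1_done"
  else if statuses.contains "approved" ∧ statuses.any (fun s => (["pending", "waiting"]).contains s) then "03_approved"
  else if statuses.any (fun s => (["new", "pending", "waiting", "approved"]).contains s) then "pending"
  else "01_in_progress"

-- ===== PORT B =====
-- B's single tallying pass: (has_cancel, approved_count, has_pending_waiting, has_any)
def pvAltStep (acc : Bool × Int × Bool × Bool) (s : String) : Bool × Int × Bool × Bool :=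
  (acc.1 || s == "cancel",
   acc.2.1 + (if s == "approved" then 1 else 0),
   acc.2.2.1 || s == "pending" || s == "waiting",
   acc.2.2.2 || s == "new" || s == "pending" || s == "waiting" || s == "approved")

def update_task_state_py_alt (statuses : List String) (required_approved : Bool) (minimal_approved : Int) : String :=
  let t := statuses.foldl pvAltStep (false, 0, false, false)
  if t.1 then "1_canceled"
  else if t.2.1 ≥ minimal_approved ∧ required_approved = true then "1_done"
  else if t.2.1 > 0 ∧ t.2.2.1 = true then "03_approved"
  else if t.2.2.2 then "pending"
  else "01_in_progress"

-- ===== PRECONDITION & SPEC =====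
def Spec_update_task_state_py (statuses : List String) (required_approved : Bool) (minimal_approved : Int) (out : String) : Prop := out = update_task_state_py_alt statuses required_approved minimal_approved
instance (statuses : List String) (required_approved : Bool) (minimal_approved : Int) (out : String) : Decidable (Spec_update_task_state_py statuses required_approved minimal_approved out) := by unfold Spec_update_task_state_py; infer_instance

-- ===== CLAIM (what is proved, stated in full; the proofs are below) =====
def Claim_equal_update_task_state_py : Prop := ∀ (statuses : List String) (required_approved : Bool) (minimal_approved : Int), Dom_update_task_state_py statuses required_approved minimal_approved → Spec_update_task_state_py statuses required_approved minimal_approved (update_task_state_py statuses required_approved minimal_approved)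

-- ===== LEMMAS AND PROOFS =====

-- ===== VERDICT (by name: the statement is the Claim_ definition above) =====

-- fold characterisation: the tally equals the five quantities A scans for
theorem pvAltStep_foldl (l : List String) (a : Bool × Int × Bool × Bool) :
    l.foldl pvAltStep a =
      (a.1 || l.contains "cancel",
       a.2.1 + (l.count "approved" : Int),
       a.2.2.1 || l.any (fun s => s == "pending" || s == "waiting"),
       a.2.2.2 || l.any (fun s => s == "new" || s == "pending" || s == "waiting" || s == "approved")) := by
  induction l generalizing a with
  | nil => simp
  | cons h t ih =>
    simp only [List.foldl_cons, ih, pvAltStep, List.contains_cons, List.count_cons, List.any_cons]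
    refine Prod.ext ?_ (Prod.ext ?_ (Prod.ext ?_ ?_))
    · simp [Bool.or_assoc, BEq.comm]
    · push_cast; ring
    · simp [Bool.or_assoc]
    · simp [Bool.or_assoc]

theorem update_task_state_py_spec : Claim_equal_update_task_state_py := by
  intro statuses ra ma _hdom
  unfold Spec_update_task_state_py update_task_state_py update_task_state_py_alt
  rw [pvAltStep_foldl]
  simp only [Bool.false_or, Int.zero_add, PySem.List.count_eq]
  have hc : (statuses.count "approved" : Int) > 0 ↔ statuses.contains "approved" = true := by
    simp [List.count_pos_iff]
  have hpw : statuses.any (fun s => s == "pending" || s == "waiting")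
      = statuses.any (fun s => (["pending", "waiting"]).contains s) := by
    rw [Bool.eq_iff_iff]; simp only [List.any_eq_true]; simp
  have hany : statuses.any (fun s => s == "new" || s == "pending" || s == "waiting" || s == "approved")
      = statuses.any (fun s => (["new", "pending", "waiting", "approved"]).contains s) := by
    rw [Bool.eq_iff_iff]; simp only [List.any_eq_true]; simp [Bool.or_assoc]
  simp only [hpw, hany, hc]
  split_ifs <;> rfl
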